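-- pv_equiv track=rewrite | github.com/carlostovarmisiontic/retos | Reto4.py | cambiar_repetidos
-- ===== SOURCE A (Python) =====
-- def cambiar_repetidos(codigos:list):
--     salida = []
--     for cod in codigos:
--         try:
--             idx = salida.index(cod)
--         except:
--             idx = -1
--         if idx != -1:
--             cont = len(list(filter(lambda x: x.startswith(cod),salida)))
--             salida.append(cod+str(cont))
--         else:
--             salida.append(cod)
--     return salida
-- ===== SOURCE B (Python) =====
-- def cambiar_repetidos(codigos: list):
--     salida = []
--     vistos = set()
--     prefijos = {}  # prefijos[p] = how many elements of salida start with p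
--     for cod in codigos:
--         if cod in vistos:
--             nuevo = cod + str(prefijos.get(cod, 0))
--         else:
--             nuevo = cod
--         salida.append(nuevo)
--         vistos.add(nuevo)
--         for i in range(len(nuevo) + 1):
--             p = nuevo[:i]
--             prefijos[p] = prefijos.get(p, 0) + 1
--     return salida
-- ===== Notes on version B (the rewrite author's own statement) =====
-- stated objective: faster
-- what changed: Replaces A's per-element salida.index scan and, for duplicates, a full startswith filter over salida, by a set for membership plus a dictionary mapping every prefix of each appended string to how many appended strings start with it, updated incrementally, so each code is handled with hash lookups only.
import Mathlib
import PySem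

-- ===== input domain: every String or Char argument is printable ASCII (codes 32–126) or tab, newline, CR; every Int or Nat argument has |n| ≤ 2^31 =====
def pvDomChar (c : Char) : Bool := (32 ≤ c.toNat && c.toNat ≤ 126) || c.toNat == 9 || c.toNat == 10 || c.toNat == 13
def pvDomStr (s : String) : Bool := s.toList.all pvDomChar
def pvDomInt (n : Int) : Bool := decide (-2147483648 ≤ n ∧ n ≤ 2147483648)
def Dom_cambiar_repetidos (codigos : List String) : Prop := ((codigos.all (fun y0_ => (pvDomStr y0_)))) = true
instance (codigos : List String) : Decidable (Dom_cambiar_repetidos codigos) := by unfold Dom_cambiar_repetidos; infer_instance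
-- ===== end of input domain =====

-- B replaces A's per-duplicate rescans of salida (list.index + a full startswith filter) by a set
-- for membership and a dict of prefix counts maintained incrementally; objective: faster.


-- ===== PORT A =====
-- one iteration of A's loop body: try idx = salida.index(cod) / except idx = -1; if idx != -1,
-- append cod + str(len(filter(startswith cod, salida))), else append cod
def pvStepA (salida : List String) (cod : String) : List String :=
  let idx : Int :=
    match PySem.List.index? salida cod with
    | some i => (i : Int)
    | none => -1
  if idx ≠ -1 then
    salida ++ [cod ++ PySem.Int.toStr (((salida.filter (fun x => PySem.Str.startswith x cod)).length : Int))]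
  else
    salida ++ [cod]

def cambiar_repetidos (codigos : List String) : List String :=
  codigos.foldl pvStepA []

-- ===== PORT B =====
-- the prefixes nuevo[:i] for i in range(len(nuevo) + 1)
def pvPrefixes (nuevo : String) : List String :=
  (PySem.List.pyRange 0 (PySem.Str.len nuevo + 1) 1).map (fun i => PySem.Str.slice nuevo none (some i))

-- one iteration of B's loop body over the state (salida, vistos, prefijos)
def pvStepB (st : List String × PySem.Set String × PySem.Dict String Int) (cod : String) :
    List String × PySem.Set String × PySem.Dict String Int :=
  let nuevo :=
    if PySem.Set.contains st.2.1 cod then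
      cod ++ PySem.Int.toStr (st.2.2.getD cod 0)
    else cod
  (st.1 ++ [nuevo], PySem.Set.add st.2.1 nuevo,
    (pvPrefixes nuevo).foldl (fun d p => d.insert p (d.getD p 0 + 1)) st.2.2)

def cambiar_repetidos_alt (codigos : List String) : List String :=
  (codigos.foldl pvStepB ([], PySem.Set.empty, PySem.Dict.empty)).1

-- ===== PRECONDITION & SPEC =====
def Spec_cambiar_repetidos (codigos : List String) (out : List String) : Prop := out = cambiar_repetidos_alt codigos
instance (codigos : List String) (out : List String) : Decidable (Spec_cambiar_repetidos codigos out) := by unfold Spec_cambiar_repetidos; infer_instance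

-- ===== CLAIM (what is proved, stated in full; the proofs are below) =====
def Claim_equal_cambiar_repetidos : Prop := ∀ (codigos : List String), Dom_cambiar_repetidos codigos → Spec_cambiar_repetidos codigos (cambiar_repetidos codigos)

-- ===== LEMMAS AND PROOFS =====

-- among k < m (with m ≤ |cs| + 1), take k = t holds for exactly one k (k = |t|) iff t <+: cs
lemma pv_countP_take (cs t : List Char) (m : Nat) (hm : m ≤ cs.length + 1) :
    (List.range m).countP (fun k => cs.take k == t) =
      if t <+: cs ∧ t.length < m then 1 else 0 := by
  induction m with
  | zero => simp
  | succ m ih =>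
    rw [List.range_succ, List.countP_append, ih (by omega)]
    have hk : cs.take m = t ↔ (t <+: cs ∧ t.length = m) := by
      constructor
      · rintro rfl
        exact ⟨List.take_prefix m cs, by simp; omega⟩
      · rintro ⟨hpre, hlen⟩
        subst hlen
        exact (List.prefix_iff_eq_take.mp hpre).symm
    by_cases hpre : t <+: cs
    · have hle : t.length ≤ cs.length := hpre.length_le
      by_cases hlt : t.length < m
      · have : ¬ cs.take m = t := by rw [hk]; omega
        simp [hpre, hlt, this]
        omega
      · by_cases heq : t.length = m
        · have : cs.take m = t := hk.mpr ⟨hpre, heq⟩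
          simp [hpre, hlt, this]
          omega
        · have : ¬ cs.take m = t := by rw [hk]; exact fun h => heq h.2
          simp [hpre, hlt, this]
          omega
    · have : ¬ cs.take m = t := by rw [hk]; exact fun h => hpre h.1
      simp [hpre, this]

-- the prefix list of s contains p exactly once iff s startswith p
lemma pv_count_prefixes (s p : String) :
    (pvPrefixes s).count p = if PySem.Str.startswith s p then 1 else 0 := by
  unfold pvPrefixes
  rw [PySem.List.pyRange_one, PySem.Str.len_eq]
  have h1 : (((s.toList.length : Int) + 1 - 0).toNat) = s.toList.length + 1 := by omega
  rw [h1, List.map_map, List.count_eq_countP, List.countP_map]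
  rw [List.countP_congr (q := fun k => s.toList.take k == p.toList) ?_]
  · rw [pv_countP_take _ _ _ (le_refl _)]
    by_cases h : PySem.Str.startswith s p
    · have hpre : p.toList <+: s.toList := by
        rw [PySem.Str.startswith_eq] at h; exact (PySem.Chars.startswith_iff _ _).mp h
      have hb : PySem.Chars.startswith s.toList p.toList = true :=
        (PySem.Chars.startswith_iff _ _).mpr hpre
      have hl : p.length ≤ s.length := by simpa using hpre.length_le
      simp [hpre, hb, hl]
    · have hpre : ¬ p.toList <+: s.toList := fun hp =>
        h (by rw [PySem.Str.startswith_eq]; exact (PySem.Chars.startswith_iff _ _).mpr hp)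
      simp [PySem.Chars.startswith_iff, hpre]
  · intro k hk
    simp only [Function.comp_apply, zero_add]
    have hsl : PySem.Str.slice s none (some (k : Int)) = String.ofList (s.toList.take k) := by
      simp [PySem.Str.slice, PySem.Chars.slice_eq_listSlice, PySem.List.slice_to_natCast]
    rw [hsl]
    have hof : ∀ (l : List Char) (q : String), (String.ofList l = q) ↔ l = q.toList := by
      intro l q
      constructor
      · rintro rfl; simp
      · rintro rfl; simp
    rw [Bool.eq_iff_iff]
    simp [hof]

-- pushing one element keeps the prefix-count dictionary in sync with the startswith filter
lemma pv_inv_d (salida : List String) (d : PySem.Dict String Int) (nuevo : String)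
    (hd : ∀ p : String, d.getD p 0 = ((salida.filter (fun x => PySem.Str.startswith x p)).length : Int)) :
    ∀ p : String, ((pvPrefixes nuevo).foldl (fun d p => d.insert p (d.getD p 0 + 1)) d).getD p 0
      = (((salida ++ [nuevo]).filter (fun x => PySem.Str.startswith x p)).length : Int) := by
  intro p
  rw [PySem.Dict.getD_foldl_insert_add_one, hd p, List.filter_append, pv_count_prefixes]
  cases h : PySem.Chars.startswith nuevo.toList p.toList <;>
    simp [List.filter, PySem.Str.startswith_eq, h]

-- the loop invariant: vistos mirrors membership in salida, prefijos counts startswith matches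
lemma pv_loop (codigos : List String) :
    ∀ (salida : List String) (vistos : PySem.Set String) (d : PySem.Dict String Int),
      (∀ x : String, x ∈ vistos ↔ x ∈ salida) →
      (∀ p : String, d.getD p 0 = ((salida.filter (fun x => PySem.Str.startswith x p)).length : Int)) →
      codigos.foldl pvStepA salida = (codigos.foldl pvStepB (salida, vistos, d)).1 := by
  induction codigos with
  | nil => intro salida vistos d hv hd; rfl
  | cons cod rest ih =>
    intro salida vistos d hv hd
    simp only [List.foldl_cons]
    set nuevo : String :=
      if PySem.Set.contains vistos cod then cod ++ PySem.Int.toStr (d.getD cod 0) else cod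
      with hnuevo
    have hB : pvStepB (salida, vistos, d) cod
        = (salida ++ [nuevo], PySem.Set.add vistos nuevo,
           (pvPrefixes nuevo).foldl (fun d p => d.insert p (d.getD p 0 + 1)) d) := by
      simp [pvStepB, hnuevo]
    have hA : pvStepA salida cod = salida ++ [nuevo] := by
      by_cases hm : cod ∈ salida
      · have hmv : cod ∈ vistos := (hv cod).mpr hm
        obtain ⟨i, hi⟩ := Option.isSome_iff_exists.mp ((PySem.List.index?_isSome_iff salida cod).mpr hm)
        have hi' : List.idxOf? cod salida = some i := by simpa using hi
        have hne : ¬ ((i : Int) = -1) := by omega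
        simp [pvStepA, hi', hne, hnuevo, hmv, hd cod]
      · have hmv : cod ∉ vistos := fun hx => hm ((hv cod).mp hx)
        have hi : PySem.List.index? salida cod = none := (PySem.List.index?_eq_none_iff _ _).mpr hm
        have hi' : List.idxOf? cod salida = none := by simpa using hi
        simp [pvStepA, hi', hnuevo, hmv]
    rw [hA, hB]
    exact ih (salida ++ [nuevo]) (PySem.Set.add vistos nuevo) _
      (fun x => by rw [PySem.Set.mem_add]; simp [hv x])
      (pv_inv_d salida d nuevo hd)

-- ===== VERDICT (by name: the statement is the Claim_ definition above) =====
theorem cambiar_repetidos_spec : Claim_equal_cambiar_repetidos := by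
  intro codigos _
  unfold Spec_cambiar_repetidos cambiar_repetidos cambiar_repetidos_alt
  exact pv_loop codigos [] PySem.Set.empty PySem.Dict.empty (by simp [PySem.Set.empty]) (by simp)
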